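-- pv_equiv track=rewrite | github.com/bopopescu/RNDL-Protocol | RNDL/encoder.py | encodehex
-- ===== SOURCE A (Python) =====
-- MAX_HEX_CHARS = 10
--
-- def encodehex(msg):
--     values = []
--     if len(msg) > MAX_HEX_CHARS:
--         for i in range(0, len(msg), MAX_HEX_CHARS):
--             values.append(msg[i:i+MAX_HEX_CHARS])
--
--     else:
--         values = [ msg ]
--
--     strings = []
--
--     for message in values:
--         temp = []
--         for s in message:
--             h = bytes(s, "ascii").hex()
--             temp.append(h)
--
--         temp = "".join(temp)
--         strings.append(temp)
--     return strings
-- ===== SOURCE B (Python) =====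
-- MAX_HEX_CHARS = 10
--
-- def encodehex(msg):
--     # hex-encode the whole message once, then slice into 20-hex-char pieces
--     full = bytes(msg, "ascii").hex()
--     if len(msg) > MAX_HEX_CHARS:
--         return [full[i:i+20] for i in range(0, len(full), 20)]
--     return [full]
-- ===== Notes on version B (the rewrite author's own statement) =====
-- stated objective: simpler
-- what changed: B hex-encodes the whole message once and slices the resulting hex string into fixed 20-character pieces, instead of A's chunk-first-then-per-character-hex nested loops with a bytes call and a join per chunk.
import Mathlib
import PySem

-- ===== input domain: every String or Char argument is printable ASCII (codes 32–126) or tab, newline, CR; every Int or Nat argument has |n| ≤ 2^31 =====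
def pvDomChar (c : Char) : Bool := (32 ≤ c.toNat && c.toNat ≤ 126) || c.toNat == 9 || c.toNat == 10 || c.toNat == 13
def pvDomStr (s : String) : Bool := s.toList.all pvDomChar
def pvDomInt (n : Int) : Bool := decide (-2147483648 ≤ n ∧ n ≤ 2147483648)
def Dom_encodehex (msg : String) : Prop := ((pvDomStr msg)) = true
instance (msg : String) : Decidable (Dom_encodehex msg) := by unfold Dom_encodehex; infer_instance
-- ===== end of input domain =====

-- B hex-encodes the whole message once and slices the hex string into 20-char pieces,
-- replacing A's chunk-first-then-per-character-hex nested loops (objective: simpler).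

-- ===== PORT A =====
-- exact port of bytes(c, "ascii").hex() for one ASCII character: two lowercase hex digits
def hexDigit (n : Nat) : Char := if n < 10 then Char.ofNat (48 + n) else Char.ofNat (87 + n)

def hexByte (n : Nat) : List Char := [hexDigit (n / 16), hexDigit (n % 16)]

def encodehex (msg : String) : List String :=
  let values : List (List Char) :=
    if PySem.Str.len msg > 10 then
      (PySem.List.pyRange 0 (PySem.Str.len msg) 10).map
        (fun i => PySem.List.slice msg.toList (some i) (some (i + 10)))
    else [msg.toList]
  values.map (fun message =>
    -- inner loop: append each character's hex pair, then "".join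
    String.ofList (message.foldl (fun temp s => temp ++ hexByte s.toNat) []))

-- ===== PORT B =====
def encodehex_alt (msg : String) : List String :=
  let full : List Char := msg.toList.flatMap (fun c => hexByte c.toNat)
  if PySem.Str.len msg > 10 then
    (PySem.List.pyRange 0 (full.length : Int) 20).map
      (fun i => String.ofList (PySem.List.slice full (some i) (some (i + 20))))
  else [String.ofList full]

-- ===== PRECONDITION & SPEC =====
def Spec_encodehex (msg : String) (out : List String) : Prop := out = encodehex_alt msg
instance (msg : String) (out : List String) : Decidable (Spec_encodehex msg out) := by unfold Spec_encodehex; infer_instance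

-- ===== CLAIM (what is proved, stated in full; the proofs are below) =====
def Claim_equal_encodehex : Prop := ∀ (msg : String), Dom_encodehex msg → Spec_encodehex msg (encodehex msg)

-- ===== LEMMAS AND PROOFS =====

lemma hx_length (m : List Char) :
    (m.flatMap (fun c => hexByte c.toNat)).length = 2 * m.length := by
  induction m with
  | nil => simp
  | cons c m ih => simp [hexByte]; omega

lemma hx_drop (m : List Char) (j : Nat) :
    List.drop (2 * j) (m.flatMap (fun c => hexByte c.toNat))
      = (List.drop j m).flatMap (fun c => hexByte c.toNat) := by
  induction m generalizing j with
  | nil => simp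
  | cons c m ih =>
    cases j with
    | zero => simp
    | succ j =>
      have h2 : 2 * (j + 1) = 2 * j + 1 + 1 := by omega
      simp only [List.flatMap_cons, hexByte, List.cons_append, List.nil_append, h2,
        List.drop_succ_cons, List.drop_succ_cons]
      exact ih j

lemma hx_take (m : List Char) (j : Nat) :
    List.take (2 * j) (m.flatMap (fun c => hexByte c.toNat))
      = (List.take j m).flatMap (fun c => hexByte c.toNat) := by
  induction m generalizing j with
  | nil => simp
  | cons c m ih =>
    cases j with
    | zero => simp
    | succ j =>
      have h2 : 2 * (j + 1) = 2 * j + 1 + 1 := by omega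
      simp only [List.flatMap_cons, hexByte, List.cons_append, List.nil_append, h2,
        List.take_succ_cons, List.take_succ_cons]
      simp only [List.cons.injEq, true_and]
      exact ih j

-- hexing commutes with chunking: the k-th 10-char source chunk hexes to the k-th 20-char hex chunk
lemma hx_chunk (m : List Char) (k : Nat) :
    (List.take 10 (List.drop (10 * k) m)).flatMap (fun c => hexByte c.toNat)
      = List.take 20 (List.drop (20 * k) (m.flatMap (fun c => hexByte c.toNat))) := by
  have hd : (20 : Nat) * k = 2 * (10 * k) := by ring
  rw [hd, hx_drop, show (20 : Nat) = 2 * 10 from rfl, hx_take]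
theorem encodehex_spec : Claim_equal_encodehex := by
  intro msg _
  unfold Spec_encodehex encodehex encodehex_alt
  simp only [PySem.Str.len_eq, hx_length]
  by_cases h : ((msg.toList.length : Int) > 10)
  · rw [if_pos h, if_pos h]
    rw [PySem.List.pyRange_of_pos 0 _ (by norm_num : (0:Int) < 10),
        PySem.List.pyRange_of_pos 0 _ (by norm_num : (0:Int) < 20)]
    have hp1 : (0:Int) < (msg.toList.length : Int) := by omega
    have hp2 : (0:Int) < ((2 * msg.toList.length : Nat) : Int) := by push_cast; omega
    have hc : (if (0:Int) < ((2 * msg.toList.length : Nat) : Int) then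
          ((((2 * msg.toList.length : Nat) : Int) - 0 + 20 - 1) / 20).toNat else 0)
        = (if (0:Int) < (msg.toList.length : Int) then
          (((msg.toList.length : Int) - 0 + 10 - 1) / 10).toNat else 0) := by
      rw [if_pos hp1, if_pos hp2]; push_cast; omega
    rw [hc]
    simp only [List.map_map]
    apply List.map_congr_left
    intro k _
    simp only [Function.comp_apply, zero_add, PySem.List.foldl_append_eq_flatMap,
      List.nil_append]
    congr 1
    have e1 : (10 * (k : Int)) = ((10 * k : Nat) : Int) := by push_cast; ring
    have e2 : (10 * (k : Int) + 10) = (((10 * k : Nat) : Int) + ((10 : Nat) : Int)) := by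
      push_cast; ring
    have e3 : (20 * (k : Int)) = ((20 * k : Nat) : Int) := by push_cast; ring
    have e4 : (20 * (k : Int) + 20) = (((20 * k : Nat) : Int) + ((20 : Nat) : Int)) := by
      push_cast; ring
    rw [e2, e1, e4, e3, PySem.List.slice_natCast_add, PySem.List.slice_natCast_add]
    exact hx_chunk msg.toList k
  · rw [if_neg h, if_neg h]
    simp [List.flatMap_def]
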